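-- pv_equiv track=rewrite | github.com/keerzon0271/rkis_lab | lab3/l3_n7.py | check
-- ===== SOURCE A (Python) =====
-- def check(numbers):
--     p = numbers % 10
--     n = numbers // 10
--     while (numbers > 0):
--         c = numbers % 10
--         if c < p:
--             return False
--         p = c
--         numbers = numbers // 10
--     return True
-- ===== SOURCE B (Python) =====
-- def check(numbers):
--     digits = []
--     while numbers > 0:
--         digits.append(numbers % 10)
--         numbers //= 10
--     return digits == sorted(digits)
-- ===== Notes on version B (the rewrite author's own statement) =====
-- stated objective: idiomatic
-- what changed: Instead of a single-pass early-exit comparison of adjacent digits, B collects the digits (least significant first) and returns digits == sorted(digits).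
import Mathlib
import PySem

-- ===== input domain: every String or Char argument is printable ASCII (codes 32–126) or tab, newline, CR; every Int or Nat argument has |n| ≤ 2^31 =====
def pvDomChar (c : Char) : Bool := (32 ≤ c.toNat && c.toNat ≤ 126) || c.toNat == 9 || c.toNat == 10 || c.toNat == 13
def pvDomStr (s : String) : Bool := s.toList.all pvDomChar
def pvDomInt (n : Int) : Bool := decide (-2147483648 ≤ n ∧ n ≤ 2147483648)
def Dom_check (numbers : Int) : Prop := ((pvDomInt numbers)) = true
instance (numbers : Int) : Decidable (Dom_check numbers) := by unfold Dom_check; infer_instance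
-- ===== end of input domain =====

-- B replaces A's single-pass early-exit adjacent-digit comparison with the idiomatic
-- "collect digits, then digits == sorted(digits)" check (return values agree everywhere).

theorem pvFloordiv10_toNat_lt (n : Int) (h : 0 < n) :
    (PySem.Int.floordiv n 10).toNat < n.toNat := by
  rw [PySem.Int.floordiv_eq_ediv_of_pos (by norm_num)]
  omega

-- ===== PORT A =====
def checkLoop (p numbers : Int) : Bool :=
  if h : numbers > 0 then
    let c := PySem.Int.mod numbers 10
    if c < p then false
    else checkLoop c (PySem.Int.floordiv numbers 10)
  else true
termination_by numbers.toNat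
decreasing_by exact pvFloordiv10_toNat_lt numbers h

def check (numbers : Int) : Bool :=
  let p := PySem.Int.mod numbers 10
  -- n = numbers // 10 is computed by A but never used
  checkLoop p numbers

-- ===== PORT B =====
def digitsLoop (numbers : Int) : List Int :=
  if h : numbers > 0 then
    PySem.Int.mod numbers 10 :: digitsLoop (PySem.Int.floordiv numbers 10)
  else []
termination_by numbers.toNat
decreasing_by exact pvFloordiv10_toNat_lt numbers h

def check_alt (numbers : Int) : Bool :=
  let digits := digitsLoop numbers
  decide (digits = PySem.List.sorted digits (fun x => x) false)

-- ===== PRECONDITION & SPEC =====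
def Spec_check (numbers : Int) (out : Bool) : Prop := out = check_alt numbers
instance (numbers : Int) (out : Bool) : Decidable (Spec_check numbers out) := by unfold Spec_check; infer_instance

-- ===== CLAIM (what is proved, stated in full; the proofs are below) =====
def Claim_equal_check : Prop := ∀ (numbers : Int), Dom_check numbers → Spec_check numbers (check numbers)

-- ===== LEMMAS AND PROOFS =====

theorem checkLoop_eq_chain (fuel : Nat) : ∀ (p n : Int), n.toNat ≤ fuel →
    checkLoop p n = decide (List.IsChain (· ≤ ·) (p :: digitsLoop n)) := by
  induction fuel with
  | zero =>
    intro p n hn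
    have h : ¬ n > 0 := by omega
    rw [checkLoop]
    unfold digitsLoop
    simp [h]
  | succ k ih =>
    intro p n hn
    rw [checkLoop]
    unfold digitsLoop
    by_cases h : n > 0
    · have hm : PySem.Int.mod n 10 = n % 10 := PySem.Int.mod_eq_emod_of_pos (by norm_num)
      simp only [h, dif_pos]
      by_cases hc : PySem.Int.mod n 10 < p
      · rw [if_pos hc]
        rw [hm] at hc
        simp only [List.isChain_cons_cons, hm, false_eq_decide_iff, not_and]
        intro hle
        omega
      · rw [if_neg hc]
        rw [ih (PySem.Int.mod n 10) (PySem.Int.floordiv n 10)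
            (by have := pvFloordiv10_toNat_lt n h; omega)]
        rw [hm] at hc ⊢
        simp only [List.isChain_cons_cons, decide_eq_decide]
        exact ⟨fun h2 => ⟨by omega, h2⟩, And.right⟩
    · simp [h]

theorem eq_sorted_iff_chain (ds : List Int) :
    (ds = PySem.List.sorted ds (fun x => x) false) ↔ List.IsChain (· ≤ ·) ds := by
  rw [List.isChain_iff_pairwise]
  constructor
  · intro h
    have := PySem.List.sorted_pairwise ds (fun x => x)
    rw [← h] at this
    exact this
  · intro h
    exact (PySem.List.sorted_eq_self_of_pairwise ds (fun x => x) h).symm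

-- ===== VERDICT (by name: the statement is the Claim_ definition above) =====
theorem check_spec : Claim_equal_check := by
  intro numbers _
  unfold Spec_check check check_alt
  simp only
  rw [checkLoop_eq_chain numbers.toNat (PySem.Int.mod numbers 10) numbers le_rfl]
  rw [decide_eq_decide, eq_sorted_iff_chain]
  unfold digitsLoop
  by_cases h : numbers > 0
  · simp [h, List.isChain_cons_cons]
  · simp [h]
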